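-- pv_equiv track=rewrite | github.com/jpeloquin/postmech | ants.py | plan_registration
-- ===== SOURCE A (Python) =====
-- from typing import Dict, Iterable, List, Optional, Tuple, Union
--
-- def plan_registration(frames, reference_frame=None) -> List[Tuple[str, Optional[str]]]:
--     """Return list of frames and what to use to initialize their registration
--
--     Returns a list of tuples, `(frame, frame to use for initialization)`, in the order
--     in which the registrations should be done.  If there should not be an initialization
--     for that frame, the second element of the tuple is None.
--
--     """
--     if reference_frame is None:
--         reference_frame = frames[0]
--     first = []
--     second = []
--     before_reference = True
--     for i, frame in enumerate(frames):
--         if frame == reference_frame: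
--             first.append((frame, None))
--             before_reference = False
--         elif before_reference:
--             second.append((frame, frames[i + 1]))
--         else:  # after reference
--             first.append((frame, frames[i - 1]))
--     plan = first + second[::-1]
--     return plan
-- ===== SOURCE B (Python) =====
-- def plan_registration(frames, reference_frame=None):
--     """Return list of frames and what to use to initialize their registration.
--
--     Different decomposition: locate the (first) reference frame by a scan, then
--     emit the plan directly in output order - reference first, then the frames
--     after it (left neighbour as initializer, None for repeated references), then
--     the frames before it walked backwards (right neighbour as initializer).
--     """
--     if not frames:
--         return []
--     if reference_frame is None:
--         reference_frame = frames[0]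
--     r = 0
--     while frames[r] != reference_frame:  # IndexError if the reference is absent
--         r += 1
--     plan = [(frames[r], None)]
--     for j in range(r + 1, len(frames)):
--         f = frames[j]
--         plan.append((f, None if f == reference_frame else frames[j - 1]))
--     for i in range(r - 1, -1, -1):
--         plan.append((frames[i], frames[i + 1]))
--     return plan
-- ===== Notes on version B (the rewrite author's own statement) =====
-- stated objective: alternative
-- what changed: Replaces A's single enumerate pass with flag state and two accumulators (then concatenating first + reversed second) by a scan for the first reference index r followed by direct emission in output order: reference, forward walk r+1..n-1, backward walk r-1..0.
import Mathlib
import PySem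

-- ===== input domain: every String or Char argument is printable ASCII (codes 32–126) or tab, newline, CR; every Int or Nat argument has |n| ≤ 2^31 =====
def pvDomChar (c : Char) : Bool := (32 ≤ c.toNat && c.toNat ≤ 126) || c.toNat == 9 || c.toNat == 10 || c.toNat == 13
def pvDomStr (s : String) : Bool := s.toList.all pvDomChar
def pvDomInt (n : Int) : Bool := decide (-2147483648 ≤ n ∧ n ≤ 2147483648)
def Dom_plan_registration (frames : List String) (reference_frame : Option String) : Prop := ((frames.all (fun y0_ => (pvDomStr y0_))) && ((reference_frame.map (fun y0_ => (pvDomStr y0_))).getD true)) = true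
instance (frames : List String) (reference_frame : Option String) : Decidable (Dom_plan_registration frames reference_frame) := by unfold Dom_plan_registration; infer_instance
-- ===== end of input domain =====

-- B plans the registrations by locating the reference index first and emitting the plan
-- directly in output order, instead of A's flag-driven single pass into two lists (alternative decomposition, same cost).

-- ===== PORT A =====
-- loop body of A's `for i, frame in enumerate(frames)` (state = (first, second, before_reference))
def pvStepA (ref : String) (frames : List String)
    (st : List (String × Option String) × List (String × Option String) × Bool)
    (iv : Int × String) : List (String × Option String) × List (String × Option String) × Bool :=
  if iv.2 == ref then (st.1 ++ [(iv.2, none)], st.2.1, false)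
  else if st.2.2 then (st.1, st.2.1 ++ [(iv.2, some (PySem.List.pyGetD frames (iv.1 + 1) ""))], st.2.2)
  else (st.1 ++ [(iv.2, some (PySem.List.pyGetD frames (iv.1 - 1) ""))], st.2.1, st.2.2)

def plan_registration (frames : List String) (reference_frame : Option String) : List (String × Option String) :=
  let ref := match reference_frame with
    | none => PySem.List.pyGetD frames 0 ""
    | some s => s
  let st := (PySem.List.enumerate frames 0).foldl (pvStepA ref frames) ([], [], true)
  st.1 ++ st.2.1.reverse

-- ===== PORT B =====
-- the `while frames[r] != reference_frame: r += 1` scan of Source B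
def pvScanB (frames : List String) (ref : String) : Nat :=
  match frames with
  | [] => 0
  | f :: rest => if f == ref then 0 else pvScanB rest ref + 1

def plan_registration_alt (frames : List String) (reference_frame : Option String) : List (String × Option String) :=
  if frames = [] then []
  else
    let ref := match reference_frame with
      | none => PySem.List.pyGetD frames 0 ""
      | some s => s
    let r : Int := pvScanB frames ref
    (PySem.List.pyGetD frames r "", none) ::
      ((PySem.List.pyRange (r + 1) frames.length 1).map (fun j =>
        let f := PySem.List.pyGetD frames j ""
        (f, if f == ref then none else some (PySem.List.pyGetD frames (j - 1) "")))) ++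
      ((PySem.List.pyRange (r - 1) (-1) (-1)).map (fun i =>
        (PySem.List.pyGetD frames i "", some (PySem.List.pyGetD frames (i + 1) ""))))

-- ===== PRECONDITION & SPEC =====
-- Pre_: exactly where A returns — A raises IndexError when frames is empty with no reference,
-- or when the (defaulted) reference frame is absent from a nonempty frames list.
def Pre_plan_registration (frames : List String) (reference_frame : Option String) : Prop :=
  (frames ≠ [] ∧ reference_frame.getD (frames.headD "") ∈ frames) ∨ (frames = [] ∧ reference_frame.isSome)

instance (frames : List String) (reference_frame : Option String) : Decidable (Pre_plan_registration frames reference_frame) := by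
  unfold Pre_plan_registration; infer_instance

def pvWitness_plan_registration : List String × Option String := (["a", "b", "c"], some "b")

def Spec_plan_registration (frames : List String) (reference_frame : Option String) (out : List (String × Option String)) : Prop := out = plan_registration_alt frames reference_frame
instance (frames : List String) (reference_frame : Option String) (out : List (String × Option String)) : Decidable (Spec_plan_registration frames reference_frame out) := by unfold Spec_plan_registration; infer_instance

-- ===== CLAIM (what is proved, stated in full; the proofs are below) =====
def Claim_equal_plan_registration : Prop := ∀ (frames : List String) (reference_frame : Option String), Dom_plan_registration frames reference_frame → Pre_plan_registration frames reference_frame → Spec_plan_registration frames reference_frame (plan_registration frames reference_frame)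


-- ===== LEMMAS AND PROOFS =====

def pvAft (prev ref : String) : List String → List (String × Option String)
  | [] => []
  | x :: xs => (x, if x == ref then none else some prev) :: pvAft x ref xs

def pvBef (ref : String) : List String → List (String × Option String)
  | [] => []
  | x :: xs => (x, some (xs.headD ref)) :: pvBef ref xs

theorem pvScanB_eq (pre post : List String) (ref : String) (h : ref ∉ pre) :
    pvScanB (pre ++ ref :: post) ref = pre.length := by
  induction pre with
  | nil => simp [pvScanB]
  | cons x xs ih =>
    simp only [List.mem_cons, not_or] at h
    simp [pvScanB, ih h.2, beq_iff_eq, Ne.symm h.1]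

theorem phase1 (ref : String) (frames : List String) (pre : List String) (s : Int)
    (first second : List (String × Option String)) (h : ref ∉ pre) :
    (PySem.List.enumerate pre s).foldl (pvStepA ref frames) (first, second, true) =
      (first, second ++ (PySem.List.enumerate pre s).map
        (fun iv => (iv.2, some (PySem.List.pyGetD frames (iv.1 + 1) ""))), true) := by
  induction pre generalizing s second with
  | nil => simp [PySem.List.enumerate_nil]
  | cons x xs ih =>
    simp only [List.mem_cons, not_or] at h
    rw [PySem.List.enumerate_cons]
    simp only [List.foldl_cons, List.map_cons]
    have hx : ¬ x = ref := fun hh => h.1 hh.symm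
    rw [show pvStepA ref frames (first, second, true) (s, x)
        = (first, second ++ [(x, some (PySem.List.pyGetD frames (s + 1) ""))], true) by
      simp [pvStepA, hx]]
    rw [ih _ _ h.2]
    simp

theorem phase2 (ref : String) (frames : List String) (post : List String) (s : Int)
    (first second : List (String × Option String)) :
    (PySem.List.enumerate post s).foldl (pvStepA ref frames) (first, second, false) =
      (first ++ (PySem.List.enumerate post s).map
        (fun iv => (iv.2, if iv.2 == ref then none
                          else some (PySem.List.pyGetD frames (iv.1 - 1) ""))), second, false) := by
  induction post generalizing s first with
  | nil => simp [PySem.List.enumerate_nil]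
  | cons x xs ih =>
    rw [PySem.List.enumerate_cons]
    simp only [List.foldl_cons, List.map_cons]
    by_cases hx : x = ref
    · rw [show pvStepA ref frames (first, second, false) (s, x)
          = (first ++ [(x, none)], second, false) by simp [pvStepA, hx]]
      rw [ih]
      simp [hx]
    · rw [show pvStepA ref frames (first, second, false) (s, x)
          = (first ++ [(x, some (PySem.List.pyGetD frames (s - 1) ""))], second, false) by
        simp [pvStepA, hx]]
      rw [ih]
      simp [hx]

theorem getD_append_len {α : Type} [Inhabited α] (l ys : List α) (d : α) :
    PySem.List.pyGetD (l ++ ys) ((l.length : Int)) d = ys.headD d := by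
  rw [PySem.List.pyGetD_natCast]
  induction l with
  | nil => cases ys <;> simp [List.getD]
  | cons x xs ih => simpa using ih

theorem getD_append_last {α : Type} [Inhabited α] (l ys : List α) (h : l ≠ []) (d : α) :
    PySem.List.pyGetD (l ++ ys) ((l.length : Int) - 1) d = l.getLast h := by
  have h1 : (0:Int) ≤ (l.length : Int) - 1 := by
    have := List.length_pos_iff.mpr h; omega
  have h2 : (l.length : Int) - 1 < ((l ++ ys).length : Int) := by
    have := List.length_pos_iff.mpr h
    simp only [List.length_append, Nat.cast_add]
    omega
  rw [PySem.List.pyGetD_eq_getElem _ _ h1 h2]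
  have hlt : ((l.length : Int) - 1).toNat < l.length := by
    have := List.length_pos_iff.mpr h; omega
  rw [List.getElem_append_left hlt]
  have : ((l.length : Int) - 1).toNat = l.length - 1 := by omega
  simp [this, List.getLast_eq_getElem]

theorem headD_append_cons {α : Type} (xs : List α) (y : α) (ys : List α) (d : α) :
    (xs ++ y :: ys).headD d = xs.headD y := by
  cases xs <;> simp

theorem exists_first_split {α : Type} [DecidableEq α] {a : α} {l : List α} (h : a ∈ l) :
    ∃ s t, l = s ++ a :: t ∧ a ∉ s := by
  induction l with
  | nil => simp at h
  | cons x xs ih =>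
    by_cases hx : a = x
    · exact ⟨[], xs, by simp [hx], by simp⟩
    · rcases ih (by simpa [hx] using h) with ⟨s, t, h1, h2⟩
      exact ⟨x :: s, t, by simp [h1], by simp [hx, h2]⟩

theorem map_bef (ref : String) (post : List String) (pre pre' : List String) :
    (PySem.List.enumerate pre (pre'.length : Int)).map
      (fun iv => (iv.2, some (PySem.List.pyGetD (pre' ++ pre ++ ref :: post) (iv.1 + 1) ""))) =
      pvBef ref pre := by
  induction pre generalizing pre' with
  | nil => simp [PySem.List.enumerate_nil, pvBef]
  | cons x xs ih =>
    rw [PySem.List.enumerate_cons]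
    simp only [List.map_cons, pvBef, List.cons_eq_cons]
    have hassoc : pre' ++ x :: xs ++ ref :: post = (pre' ++ [x]) ++ (xs ++ ref :: post) := by simp
    have hc : ((pre'.length : Int) + 1) = (((pre' ++ [x]).length : Int)) := by simp
    refine ⟨?_, ?_⟩
    · rw [hassoc, hc, getD_append_len, headD_append_cons]
    · rw [hassoc, hc]
      simpa using ih (pre' ++ [x])

theorem map_aft (ref : String) (pre'' : List String) (post : List String) (h : pre'' ≠ []) :
    (PySem.List.enumerate post (pre''.length : Int)).map
      (fun iv => (iv.2, if iv.2 == ref then none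
                        else some (PySem.List.pyGetD (pre'' ++ post) (iv.1 - 1) ""))) =
      pvAft (pre''.getLast h) ref post := by
  induction post generalizing pre'' with
  | nil => simp [PySem.List.enumerate_nil, pvAft]
  | cons x xs ih =>
    rw [PySem.List.enumerate_cons]
    simp only [List.map_cons, pvAft, List.cons_eq_cons]
    have hassoc : pre'' ++ x :: xs = (pre'' ++ [x]) ++ xs := by simp
    have hc : ((pre''.length : Int) + 1) = (((pre'' ++ [x]).length : Int)) := by simp
    refine ⟨?_, ?_⟩
    · have hl : (PySem.List.pyGetD (pre'' ++ x :: xs) ((pre''.length : Int) - 1) "")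
          = pre''.getLast h := getD_append_last _ _ h _
      rw [hl]
    · rw [hassoc, hc]
      have := ih (pre'' ++ [x]) (by simp)
      rw [this]
      simp

theorem range_aft (ref : String) (pre'' : List String) (post : List String) (h : pre'' ≠ []) :
    (PySem.List.pyRange (pre''.length : Int) (((pre'' ++ post).length : Int)) 1).map (fun j =>
        let f := PySem.List.pyGetD (pre'' ++ post) j ""
        (f, if f == ref then none else some (PySem.List.pyGetD (pre'' ++ post) (j - 1) ""))) =
      pvAft (pre''.getLast h) ref post := by
  induction post generalizing pre'' with
  | nil =>
    rw [PySem.List.pyRange_one_eq_nil (by simp)]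
    simp [pvAft]
  | cons x xs ih =>
    rw [PySem.List.pyRange_one_cons (by simp)]
    simp only [List.map_cons, pvAft, List.cons_eq_cons]
    have hassoc : pre'' ++ x :: xs = (pre'' ++ [x]) ++ xs := by simp
    have hc : ((pre''.length : Int) + 1) = (((pre'' ++ [x]).length : Int)) := by simp
    refine ⟨?_, ?_⟩
    · have hx : PySem.List.pyGetD (pre'' ++ x :: xs) ((pre''.length : Int)) ""
          = x := by rw [getD_append_len]; simp
      have hl : (PySem.List.pyGetD (pre'' ++ x :: xs) ((pre''.length : Int) - 1) "")
          = pre''.getLast h := getD_append_last _ _ h _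
      simp only [hx, hl]
    · rw [hassoc, hc]
      have := ih (pre'' ++ [x]) (by simp)
      rw [this]
      simp

theorem range_bef (ref : String) (post : List String) (pre pre' : List String) :
    (PySem.List.pyRange ((pre'.length : Int)) ((pre'.length : Int) + pre.length) 1).map (fun i =>
        (PySem.List.pyGetD (pre' ++ pre ++ ref :: post) i "",
         some (PySem.List.pyGetD (pre' ++ pre ++ ref :: post) (i + 1) ""))) =
      pvBef ref pre := by
  induction pre generalizing pre' with
  | nil =>
    rw [PySem.List.pyRange_one_eq_nil (by simp)]
    simp [pvBef]
  | cons x xs ih =>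
    rw [PySem.List.pyRange_one_cons (by simp)]
    simp only [List.map_cons, pvBef, List.cons_eq_cons]
    have hassoc : pre' ++ x :: xs ++ ref :: post = (pre' ++ [x]) ++ (xs ++ ref :: post) := by simp
    have hc : ((pre'.length : Int) + 1) = (((pre' ++ [x]).length : Int)) := by simp
    refine ⟨?_, ?_⟩
    · have hx : PySem.List.pyGetD (pre' ++ x :: xs ++ ref :: post) ((pre'.length : Int)) ""
          = x := by rw [List.append_assoc, getD_append_len]; simp
      rw [hx, hassoc, hc, getD_append_len, headD_append_cons]
    · have hlen : (pre'.length : Int) + (x :: xs).length = ((pre' ++ [x]).length : Int) + xs.length := by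
        simp; omega
      rw [hc, hassoc]
      have := ih (pre' ++ [x])
      rw [show ((pre'.length : Int)) + ((x :: xs).length : Int) = ((pre' ++ [x]).length : Int) + (xs.length : Int) by simp; omega]
      simpa using this

theorem main_eq (pre post : List String) (ref : String) (h : ref ∉ pre) :
    plan_registration (pre ++ ref :: post) (some ref)
      = plan_registration_alt (pre ++ ref :: post) (some ref) := by
  have hA : plan_registration (pre ++ ref :: post) (some ref)
      = (ref, none) :: pvAft ref ref post ++ (pvBef ref pre).reverse := by
    show (let st := (PySem.List.enumerate (pre ++ ref :: post) 0).foldl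
            (pvStepA ref (pre ++ ref :: post)) ([], [], true);
          st.1 ++ st.2.1.reverse) = _
    rw [PySem.List.enumerate_append, List.foldl_append]
    rw [phase1 ref _ pre 0 [] [] h]
    rw [PySem.List.enumerate_cons, List.foldl_cons]
    simp only [List.nil_append]
    rw [show pvStepA ref (pre ++ ref :: post)
          ([], List.map (fun iv => (iv.2, some (PySem.List.pyGetD (pre ++ ref :: post) (iv.1 + 1) "")))
            (PySem.List.enumerate pre 0), true) (0 + (pre.length : Int), ref)
        = ([(ref, none)], List.map (fun iv => (iv.2, some (PySem.List.pyGetD (pre ++ ref :: post) (iv.1 + 1) "")))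
            (PySem.List.enumerate pre 0), false) by simp [pvStepA]]
    rw [phase2]
    have e1 : (PySem.List.enumerate pre ((0:Int))).map
        (fun iv => (iv.2, some (PySem.List.pyGetD (pre ++ ref :: post) (iv.1 + 1) ""))) = pvBef ref pre := by
      have := map_bef ref post pre []
      simpa using this
    have e2 : (PySem.List.enumerate post (0 + (pre.length : Int) + 1)).map
        (fun iv => (iv.2, if iv.2 == ref then none
                          else some (PySem.List.pyGetD (pre ++ ref :: post) (iv.1 - 1) ""))) = pvAft ref ref post := by
      have h2 : (pre ++ [ref]) ≠ [] := by simp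
      have := map_aft ref (pre ++ [ref]) post h2
      rw [List.getLast_append_singleton] at this
      rw [show (0 + (pre.length : Int) + 1) = (((pre ++ [ref]).length : Int)) by simp]
      rw [show pre ++ ref :: post = (pre ++ [ref]) ++ post by simp]
      exact this
    simp only [zero_add] at e1 e2 ⊢
    rw [e1, e2]
    simp
  have hB : plan_registration_alt (pre ++ ref :: post) (some ref)
      = (ref, none) :: pvAft ref ref post ++ (pvBef ref pre).reverse := by
    rw [plan_registration_alt]
    rw [if_neg (by simp)]
    have hscan : (pvScanB (pre ++ ref :: post) ref : Int) = (pre.length : Int) := by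
      rw [pvScanB_eq pre post ref h]
    simp only [hscan]
    have hr : PySem.List.pyGetD (pre ++ ref :: post) ((pre.length : Int)) "" = ref := by
      rw [getD_append_len]; simp
    rw [hr]
    have e2 : (PySem.List.pyRange ((pre.length : Int) + 1) (((pre ++ ref :: post).length : Int)) 1).map (fun j =>
          let f := PySem.List.pyGetD (pre ++ ref :: post) j ""
          (f, if f == ref then none else some (PySem.List.pyGetD (pre ++ ref :: post) (j - 1) ""))) =
        pvAft ref ref post := by
      have h2 : (pre ++ [ref]) ≠ [] := by simp
      have := range_aft ref (pre ++ [ref]) post h2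
      rw [List.getLast_append_singleton] at this
      rw [show ((pre.length : Int) + 1) = (((pre ++ [ref]).length : Int)) by simp]
      rw [show pre ++ ref :: post = (pre ++ [ref]) ++ post by simp]
      exact this
    have e3 : (PySem.List.pyRange ((pre.length : Int) - 1) (-1) (-1)).map (fun i =>
          (PySem.List.pyGetD (pre ++ ref :: post) i "",
           some (PySem.List.pyGetD (pre ++ ref :: post) (i + 1) ""))) =
        (pvBef ref pre).reverse := by
      rw [PySem.List.pyRange_neg_one_eq_reverse]
      rw [show ((pre.length : Int) - 1 + 1) = (pre.length : Int) by ring,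
          show ((-1 : Int) + 1) = 0 by ring]
      rw [List.map_reverse]
      have := range_bef ref post pre []
      simpa using this
    rw [e2, e3]
  rw [hA, hB]

-- ===== VERDICT (by name: the statement is the Claim_ definition above) =====
theorem plan_registration_spec : Claim_equal_plan_registration := by
  intro frames reference_frame _ hpre
  unfold Spec_plan_registration
  cases reference_frame with
  | none =>
    have hne : frames ≠ [] := by
      rcases hpre with ⟨h1, _⟩ | ⟨_, h2⟩
      · exact h1
      · simp at h2
    obtain ⟨f, rest, rfl⟩ := List.exists_cons_of_ne_nil hne
    have hA : plan_registration (f :: rest) none = plan_registration (f :: rest) (some f) := by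
      simp [plan_registration, PySem.List.pyGetD_zero_cons]
    have hB : plan_registration_alt (f :: rest) none = plan_registration_alt (f :: rest) (some f) := by
      simp [plan_registration_alt, PySem.List.pyGetD_zero_cons]
    rw [hA, hB]
    simpa using main_eq [] rest f (by simp)
  | some s =>
    rcases hpre with ⟨h1, h2⟩ | ⟨h1, _⟩
    · simp only [Option.getD_some] at h2
      obtain ⟨pre, post, rfl, hnm⟩ := exists_first_split h2
      exact main_eq pre post s hnm
    · subst h1
      simp [plan_registration, plan_registration_alt, PySem.List.enumerate_nil]
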